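-- pv_equiv track=rewrite | github.com/dead-beef/markovchain | markovchain/image/traversal.py | _rspiral
-- ===== SOURCE A (Python) =====
-- def _rspiral(width, height):
--     """Reversed spiral generator.
--
--     Parameters
--     ----------
--     width : `int`
--         Spiral width.
--     height : `int`
--         Spiral height.
--
--     Returns
--     -------
--     `generator` of (`int`, `int`)
--         Points.
--     """
--
--     x0 = 0
--     y0 = 0
--     x1 = width - 1
--     y1 = height - 1
--
--     while x0 < x1 and y0 < y1:
--         for x in range(x0, x1):
--             yield x, y0
--         for y in range(y0, y1):
--             yield x1, y
--         for x in range(x1, x0, -1):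
--             yield x, y1
--         for y in range(y1, y0, -1):
--             yield x0, y
--
--         x0 += 1
--         y0 += 1
--         x1 -= 1
--         y1 -= 1
--
--     if x0 == x1:
--         for y in range(y0, y1 + 1):
--             yield x0, y
--     elif y0 == y1:
--         for x in range(x0, x1 + 1):
--             yield x, y0
-- ===== SOURCE B (Python) =====
-- def _rspiral(width, height):
--     if width <= 0 or height <= 0:
--         return
--     left, right, top, bottom = 0, width - 1, 0, height - 1
--     x = y = 0
--     dx, dy = 1, 0
--     for _ in range(width * height):
--         yield x, y
--         nx, ny = x + dx, y + dy
--         if nx < left or nx > right or ny < top or ny > bottom: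
--             if dx == 1:
--                 top += 1
--                 dx, dy = 0, 1
--             elif dy == 1:
--                 right -= 1
--                 dx, dy = -1, 0
--             elif dx == -1:
--                 bottom -= 1
--                 dx, dy = 0, -1
--             else:
--                 left += 1
--                 dx, dy = 1, 0
--             nx, ny = x + dx, y + dy
--         x, y = nx, ny
-- ===== Notes on version B (the rewrite author's own statement) =====
-- stated objective: alternative
-- what changed: A emits each ring via four range() loops over shrinking bounds; B is a single-pointer spiral walker that tracks one position, a direction and four boundaries, emitting exactly width*height cells in one uniform loop and turning clockwise (tightening the boundary it leaves) whenever the next step would exit the active rectangle.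
import Mathlib
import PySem

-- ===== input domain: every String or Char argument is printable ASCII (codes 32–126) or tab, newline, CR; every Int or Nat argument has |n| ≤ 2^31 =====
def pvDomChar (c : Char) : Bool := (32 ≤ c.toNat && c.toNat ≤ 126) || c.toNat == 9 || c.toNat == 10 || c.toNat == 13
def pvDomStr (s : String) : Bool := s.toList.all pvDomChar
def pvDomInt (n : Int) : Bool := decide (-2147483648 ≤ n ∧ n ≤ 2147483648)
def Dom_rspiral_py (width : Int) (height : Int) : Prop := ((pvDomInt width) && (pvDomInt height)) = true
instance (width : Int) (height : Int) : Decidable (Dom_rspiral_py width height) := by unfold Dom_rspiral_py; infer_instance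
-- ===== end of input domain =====

-- B replaces A's four-ranges-per-ring shrinking-bounds generator by a single-pointer spiral
-- walker (position + direction + four boundaries, exactly width*height emissions): 'alternative'.

-- ===== PORT A =====
-- the while loop of _rspiral over the bounds (x0, y0, x1, y1), plus the trailing
-- single-column / single-row code after the loop
def rspiralLoop (x0 y0 x1 y1 : Int) : List (Int × Int) :=
  if _h : x0 < x1 ∧ y0 < y1 then
    ((PySem.List.pyRange x0 x1 1).map (fun x => (x, y0)))
      ++ ((PySem.List.pyRange y0 y1 1).map (fun y => (x1, y)))
      ++ ((PySem.List.pyRange x1 x0 (-1)).map (fun x => (x, y1)))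
      ++ ((PySem.List.pyRange y1 y0 (-1)).map (fun y => (x0, y)))
      ++ rspiralLoop (x0 + 1) (y0 + 1) (x1 - 1) (y1 - 1)
  else if x0 = x1 then (PySem.List.pyRange y0 (y1 + 1) 1).map (fun y => (x0, y))
  else if y0 = y1 then (PySem.List.pyRange x0 (x1 + 1) 1).map (fun x => (x, y0))
  else []
termination_by (x1 - x0).toNat
decreasing_by omega

def rspiral_py (width : Int) (height : Int) : List (Int × Int) :=
  rspiralLoop 0 0 (width - 1) (height - 1)

-- ===== PORT B =====
-- the 'for _ in range(width * height)' walker loop of Source B: fuel = number of cells still to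
-- emit; state = bounds (l, r, t, bo), position (x, y), direction (dx, dy)
def altLoop : Nat → Int → Int → Int → Int → Int → Int → Int → Int → List (Int × Int)
  | 0, _, _, _, _, _, _, _, _ => []
  | n + 1, l, r, t, bo, x, y, dx, dy =>
    (x, y) ::
      (let nx := x + dx
       let ny := y + dy
       if nx < l ∨ nx > r ∨ ny < t ∨ ny > bo then
         if dx = 1 then altLoop n l r (t + 1) bo x (y + 1) 0 1
         else if dy = 1 then altLoop n l (r - 1) t bo (x - 1) y (-1) 0
         else if dx = -1 then altLoop n l r t (bo - 1) x (y - 1) 0 (-1)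
         else altLoop n (l + 1) r t bo (x + 1) y 1 0
       else altLoop n l r t bo nx ny dx dy)

def rspiral_py_alt (width : Int) (height : Int) : List (Int × Int) :=
  if width ≤ 0 ∨ height ≤ 0 then []
  else altLoop (width * height).toNat 0 (width - 1) 0 (height - 1) 0 0 1 0

-- ===== PRECONDITION & SPEC =====
def Spec_rspiral_py (width : Int) (height : Int) (out : List (Int × Int)) : Prop := out = rspiral_py_alt width height
instance (width : Int) (height : Int) (out : List (Int × Int)) : Decidable (Spec_rspiral_py width height out) := by unfold Spec_rspiral_py; infer_instance

-- ===== CLAIM (what is proved, stated in full; the proofs are below) =====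
def Claim_equal_rspiral_py : Prop := ∀ (width : Int) (height : Int), Dom_rspiral_py width height → Spec_rspiral_py width height (rspiral_py width height)

-- ===== LEMMAS AND PROOFS =====

-- countdown-range snoc: range(a, b-2, -1) reaches down to b inclusive
theorem pyRange_neg_snoc (a b : Int) (h : b ≤ a) :
    PySem.List.pyRange a (b - 1) (-1) = PySem.List.pyRange a b (-1) ++ [b] := by
  rw [PySem.List.pyRange_neg_one_eq_reverse, PySem.List.pyRange_neg_one_eq_reverse]
  rw [show b - 1 + 1 = b from by ring]
  rw [PySem.List.pyRange_one_cons (by omega : b < a + 1)]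
  simp

-- the walker runs right along the top edge from (x, t) to (r, t), then turns down
theorem run_right (c : Nat) : ∀ (rest : Nat) (l r t bo x : Int), l ≤ x → x + c = r → t ≤ bo →
    altLoop (c + 1 + rest) l r t bo x t 1 0 =
      ((PySem.List.pyRange x (r + 1) 1).map (fun u => (u, t)))
        ++ altLoop rest l r (t + 1) bo r (t + 1) 0 1 := by
  induction c with
  | zero =>
    intro rest l r t bo x hl hx ht
    have hxr : x = r := by omega
    subst hxr
    rw [show 0 + 1 + rest = rest + 1 from by omega]
    simp only [altLoop]
    rw [if_pos (by omega : x + 1 < l ∨ x + 1 > x ∨ t + 0 < t ∨ t + 0 > bo)]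
    rw [PySem.List.pyRange_one_singleton]
    simp
  | succ c ih =>
    intro rest l r t bo x hl hx ht
    have hxr : x < r := by omega
    rw [show c + 1 + 1 + rest = (c + 1 + rest) + 1 from by omega]
    simp only [altLoop]
    rw [if_neg (by omega : ¬(x + 1 < l ∨ x + 1 > r ∨ t + 0 < t ∨ t + 0 > bo))]
    rw [show t + 0 = t from by ring]
    rw [ih rest l r t bo (x + 1) (by omega) (by omega) ht]
    rw [PySem.List.pyRange_one_cons (by omega : x < r + 1)]
    simp

-- the walker runs down the right edge from (r, y) to (r, bo), then turns left
theorem run_down (c : Nat) : ∀ (rest : Nat) (l r t bo y : Int), t ≤ y → y + c = bo → l ≤ r →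
    altLoop (c + 1 + rest) l r t bo r y 0 1 =
      ((PySem.List.pyRange y (bo + 1) 1).map (fun v => (r, v)))
        ++ altLoop rest l (r - 1) t bo (r - 1) bo (-1) 0 := by
  induction c with
  | zero =>
    intro rest l r t bo y ht hy hlr
    have hyb : y = bo := by omega
    subst hyb
    rw [show 0 + 1 + rest = rest + 1 from by omega]
    simp only [altLoop]
    rw [if_pos (by omega : r + 0 < l ∨ r + 0 > r ∨ y + 1 < t ∨ y + 1 > y)]
    rw [PySem.List.pyRange_one_singleton]
    simp
  | succ c ih =>
    intro rest l r t bo y ht hy hlr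
    have hyb : y < bo := by omega
    rw [show c + 1 + 1 + rest = (c + 1 + rest) + 1 from by omega]
    simp only [altLoop]
    rw [if_neg (by omega : ¬(r + 0 < l ∨ r + 0 > r ∨ y + 1 < t ∨ y + 1 > bo))]
    rw [show r + 0 = r from by ring]
    rw [ih rest l r t bo (y + 1) (by omega) (by omega) hlr]
    rw [PySem.List.pyRange_one_cons (by omega : y < bo + 1)]
    simp

-- the walker runs left along the bottom edge from (x, bo) to (l, bo), then turns up
theorem run_left (c : Nat) : ∀ (rest : Nat) (l r t bo x : Int), x ≤ r → x - c = l → t ≤ bo →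
    altLoop (c + 1 + rest) l r t bo x bo (-1) 0 =
      ((PySem.List.pyRange x (l - 1) (-1)).map (fun u => (u, bo)))
        ++ altLoop rest l r t (bo - 1) l (bo - 1) 0 (-1) := by
  induction c with
  | zero =>
    intro rest l r t bo x hr hx ht
    have hxl : x = l := by omega
    subst hxl
    rw [show 0 + 1 + rest = rest + 1 from by omega]
    simp only [altLoop]
    rw [if_pos (by omega : x + -1 < x ∨ x + -1 > r ∨ bo + 0 < t ∨ bo + 0 > bo)]
    rw [PySem.List.pyRange_neg_one_cons (by omega : x - 1 < x),
      PySem.List.pyRange_neg_one_eq_nil (by omega : x - 1 ≤ x - 1)]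
    simp
  | succ c ih =>
    intro rest l r t bo x hr hx ht
    have hxl : l < x := by omega
    rw [show c + 1 + 1 + rest = (c + 1 + rest) + 1 from by omega]
    simp only [altLoop]
    rw [if_neg (by omega : ¬(x + -1 < l ∨ x + -1 > r ∨ bo + 0 < t ∨ bo + 0 > bo))]
    rw [show bo + 0 = bo from by ring, show x + -1 = x - 1 from by ring]
    rw [ih rest l r t bo (x - 1) (by omega) (by omega) ht]
    rw [PySem.List.pyRange_neg_one_cons (by omega : l - 1 < x)]
    simp

-- the walker runs up the left edge from (l, y) to (l, t), then turns right
theorem run_up (c : Nat) : ∀ (rest : Nat) (l r t bo y : Int), t ≤ y → y - c = t → l ≤ r → y - 1 ≤ bo →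
    altLoop (c + 1 + rest) l r t bo l y 0 (-1) =
      ((PySem.List.pyRange y (t - 1) (-1)).map (fun v => (l, v)))
        ++ altLoop rest (l + 1) r t bo (l + 1) t 1 0 := by
  induction c with
  | zero =>
    intro rest l r t bo y ht hy hlr hybo
    have hyt : y = t := by omega
    subst hyt
    rw [show 0 + 1 + rest = rest + 1 from by omega]
    simp only [altLoop]
    rw [if_pos (by omega : l + 0 < l ∨ l + 0 > r ∨ y + -1 < y ∨ y + -1 > bo)]
    rw [PySem.List.pyRange_neg_one_cons (by omega : y - 1 < y),
      PySem.List.pyRange_neg_one_eq_nil (by omega : y - 1 ≤ y - 1)]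
    simp
  | succ c ih =>
    intro rest l r t bo y ht hy hlr hybo
    have hyt : t < y := by omega
    rw [show c + 1 + 1 + rest = (c + 1 + rest) + 1 from by omega]
    simp only [altLoop]
    rw [if_neg (by omega : ¬(l + 0 < l ∨ l + 0 > r ∨ y + -1 < t ∨ y + -1 > bo))]
    rw [show l + 0 = l from by ring, show y + -1 = y - 1 from by ring]
    rw [ih rest l r t bo (y - 1) (by omega) (by omega) hlr (by omega)]
    rw [PySem.List.pyRange_neg_one_cons (by omega : t - 1 < y)]
    simp

-- A returns nothing on an empty region
theorem spiral_nil (l t r bo : Int) (h : r < l ∨ bo < t) : rspiralLoop l t r bo = [] := by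
  rw [rspiralLoop]
  rw [dif_neg (by omega : ¬(l < r ∧ t < bo))]
  split_ifs with h1 h2
  · rw [PySem.List.pyRange_one_eq_nil (by omega)]; simp
  · rw [PySem.List.pyRange_one_eq_nil (by omega)]; simp
  · rfl

theorem main_lemma : ∀ (n : Nat) (l t r bo : Int), (r - l).toNat ≤ n → l ≤ r → t ≤ bo →
    rspiralLoop l t r bo =
      altLoop ((r - l + 1) * (bo - t + 1)).toNat l r t bo l t 1 0 := by
  intro n
  induction n using Nat.strong_induction_on with
  | _ n ih =>
    intro l t r bo hn hlr htb
    by_cases hp : l < r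
    · by_cases hq : t < bo
      · -- a full outer ring
        rw [rspiralLoop, dif_pos ⟨hp, hq⟩]
        by_cases hq1 : bo = t + 1
        · -- two-row ring: the walker does three runs and is done
          subst hq1
          rw [show ((r - l + 1) * (t + 1 - t + 1)).toNat
              = (r - l).toNat + 1 + (0 + 1 + ((r - 1 - l).toNat + 1 + 0)) from by
            have : (r - l + 1) * (t + 1 - t + 1) = 2 * (r - l) + 2 := by ring
            omega]
          rw [run_right (r - l).toNat _ l r t (t + 1) l le_rfl (by omega) (by omega)]
          rw [run_down 0 _ l r (t + 1) (t + 1) (t + 1) le_rfl (by omega) (by omega)]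
          rw [run_left (r - 1 - l).toNat 0 l (r - 1) (t + 1) (t + 1) (r - 1) le_rfl
            (by omega) (by omega)]
          rw [spiral_nil (l + 1) (t + 1) (r - 1) (t + 1 - 1) (by omega)]
          rw [PySem.List.pyRange_one_succ_right (by omega : l ≤ r)]
          rw [PySem.List.pyRange_neg_one_cons (by omega : l < r)]
          rw [pyRange_neg_snoc (r - 1) l (by omega)]
          rw [PySem.List.pyRange_neg_one_cons (by omega : t < t + 1)]
          rw [show (t : Int) + 1 - 1 = t from by ring]
          rw [PySem.List.pyRange_neg_one_eq_nil (by omega : t ≤ t)]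
          simp [altLoop, PySem.List.pyRange_one_singleton]
        · -- ring with at least two inner rows: four runs, then the inner spiral
          have hq2 : t + 1 < bo := by omega
          have hprod : (r - l + 1) * (bo - t + 1)
              = (r - l - 1) * (bo - t - 1) + 2 * (r - l) + 2 * (bo - t) := by ring
          have hnn : 0 ≤ (r - l - 1) * (bo - t - 1) :=
            mul_nonneg (by omega) (by omega)
          rw [show ((r - l + 1) * (bo - t + 1)).toNat
              = (r - l).toNat + 1 + ((bo - t - 1).toNat + 1 + ((r - 1 - l).toNat + 1
                + ((bo - t - 2).toNat + 1 + ((r - l - 1) * (bo - t - 1)).toNat))) from by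
            omega]
          rw [run_right (r - l).toNat _ l r t bo l le_rfl (by omega) (by omega)]
          rw [run_down (bo - t - 1).toNat _ l r (t + 1) bo (t + 1) le_rfl (by omega)
            (by omega)]
          rw [run_left (r - 1 - l).toNat _ l (r - 1) (t + 1) bo (r - 1) le_rfl (by omega)
            (by omega)]
          rw [run_up (bo - t - 2).toNat _ l (r - 1) (t + 1) (bo - 1) (bo - 1) (by omega)
            (by omega) (by omega) (by omega)]
          by_cases hp2 : l + 1 ≤ r - 1
          · rw [ih ((r - l).toNat - 2) (by omega) (l + 1) (t + 1) (r - 1) (bo - 1)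
              (by omega) (by omega) (by omega)]
            rw [show (r - 1 - (l + 1) + 1) * (bo - 1 - (t + 1) + 1)
                = (r - l - 1) * (bo - t - 1) from by ring]
            rw [PySem.List.pyRange_one_succ_right (by omega : l ≤ r)]
            rw [PySem.List.pyRange_one_cons (by omega : t < bo)]
            rw [PySem.List.pyRange_one_succ_right (by omega : t + 1 ≤ bo)]
            rw [PySem.List.pyRange_neg_one_cons (by omega : l < r)]
            rw [pyRange_neg_snoc (r - 1) l (by omega)]
            rw [PySem.List.pyRange_neg_one_cons (by omega : t < bo)]
            simp
          · -- one-column inner region: nothing left after the four runs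
            have hrl : r = l + 1 := by omega
            rw [show ((r - l - 1) * (bo - t - 1)).toNat = 0 from by
              rw [hrl]; simp]
            rw [spiral_nil (l + 1) (t + 1) (r - 1) (bo - 1) (by omega)]
            rw [PySem.List.pyRange_one_succ_right (by omega : l ≤ r)]
            rw [PySem.List.pyRange_one_cons (by omega : t < bo)]
            rw [PySem.List.pyRange_one_succ_right (by omega : t + 1 ≤ bo)]
            rw [PySem.List.pyRange_neg_one_cons (by omega : l < r)]
            rw [pyRange_neg_snoc (r - 1) l (by omega)]
            rw [PySem.List.pyRange_neg_one_cons (by omega : t < bo)]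
            simp [altLoop]
      · -- single row
        have hbt : bo = t := by omega
        subst hbt
        rw [rspiralLoop, dif_neg (by omega : ¬(l < r ∧ bo < bo))]
        rw [if_neg (by omega : ¬l = r), if_pos rfl]
        rw [show ((r - l + 1) * (bo - bo + 1)).toNat = (r - l).toNat + 1 + 0 from by
          have : (r - l + 1) * (bo - bo + 1) = r - l + 1 := by ring
          omega]
        rw [run_right (r - l).toNat 0 l r bo bo l le_rfl (by omega) le_rfl]
        simp [altLoop]
    · -- single column (or a single cell)
      have hrl : r = l := by omega
      subst hrl
      rw [rspiralLoop, dif_neg (by omega : ¬(r < r ∧ t < bo)), if_pos rfl]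
      by_cases hq : t < bo
      · rw [show ((r - r + 1) * (bo - t + 1)).toNat
            = 0 + 1 + ((bo - t - 1).toNat + 1 + 0) from by
          have : (r - r + 1) * (bo - t + 1) = bo - t + 1 := by ring
          omega]
        rw [run_right 0 _ r r t bo r le_rfl (by omega) (by omega)]
        rw [run_down (bo - t - 1).toNat 0 r r (t + 1) bo (t + 1) le_rfl (by omega) le_rfl]
        rw [PySem.List.pyRange_one_cons (by omega : t < bo + 1)]
        rw [PySem.List.pyRange_one_singleton]
        simp [altLoop]
      · have hbt : bo = t := by omega
        subst hbt
        rw [show ((r - r + 1) * (bo - bo + 1)).toNat = 0 + 1 + 0 from by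
          have : (r - r + 1) * (bo - bo + 1) = 1 := by ring
          omega]
        rw [run_right 0 0 r r bo bo r le_rfl (by omega) le_rfl]
        rw [PySem.List.pyRange_one_singleton]
        simp [altLoop]

-- ===== VERDICT (by name: the statement is the Claim_ definition above) =====
theorem rspiral_py_spec : Claim_equal_rspiral_py := by
  intro w h _
  unfold Spec_rspiral_py rspiral_py rspiral_py_alt
  by_cases hwh : w ≤ 0 ∨ h ≤ 0
  · rw [if_pos hwh]
    exact spiral_nil _ _ _ _ (by omega)
  · rw [if_neg hwh]
    have h2 := main_lemma (w - 1 - 0).toNat 0 0 (w - 1) (h - 1) le_rfl (by omega) (by omega)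
    rw [show ((w - 1 - 0 + 1) * (h - 1 - 0 + 1)) = w * h from by ring] at h2
    exact h2
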